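-- pv_equiv track=rewrite | github.com/cysun0226/junyi-test | 2.py | factor_num
-- ===== SOURCE A (Python) =====
-- def factor_num(num):
--     result_num = 0
--     for i in range(1, num+1):
--         if ((i % 3 == 0 or i % 5 == 0) and (i % 15 != 0)):
--             result_num = result_num
--         else:
--             result_num += 1
--     return result_num
-- ===== SOURCE B (Python) =====
-- def factor_num(num):
--     n = max(num, 0)
--     return n - n // 3 - n // 5 + 2 * (n // 15)
-- ===== Notes on version B (the rewrite author's own statement) =====
-- stated objective: faster
-- what changed: replaces the linear loop by a closed-form inclusion-exclusion count over the multiples of three, five and fifteen, clamped at zero for nonpositive input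
import Mathlib
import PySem

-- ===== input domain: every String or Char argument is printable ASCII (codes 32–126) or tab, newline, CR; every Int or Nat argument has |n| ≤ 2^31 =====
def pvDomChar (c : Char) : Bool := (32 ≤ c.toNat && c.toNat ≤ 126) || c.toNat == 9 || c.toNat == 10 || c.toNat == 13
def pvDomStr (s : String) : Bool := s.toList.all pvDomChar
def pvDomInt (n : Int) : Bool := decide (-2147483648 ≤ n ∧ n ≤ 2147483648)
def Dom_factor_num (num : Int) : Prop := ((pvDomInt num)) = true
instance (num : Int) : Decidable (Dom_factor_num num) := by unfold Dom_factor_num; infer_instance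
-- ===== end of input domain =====

-- B replaces A's 1..num loop by a closed-form inclusion-exclusion count (objective: faster).

-- ===== PORT A =====
def factor_num (num : Int) : Int :=
  (PySem.List.pyRange 1 (num + 1) 1).foldl
    (fun result_num i =>
      if (PySem.Int.mod i 3 = 0 ∨ PySem.Int.mod i 5 = 0) ∧ PySem.Int.mod i 15 ≠ 0 then
        result_num
      else
        result_num + 1) 0

-- ===== PORT B =====
def factor_num_alt (num : Int) : Int :=
  let n := max num 0
  n - PySem.Int.floordiv n 3 - PySem.Int.floordiv n 5 + 2 * PySem.Int.floordiv n 15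

-- ===== PRECONDITION & SPEC =====
def Spec_factor_num (num : Int) (out : Int) : Prop := out = factor_num_alt num
instance (num : Int) (out : Int) : Decidable (Spec_factor_num num out) := by unfold Spec_factor_num; infer_instance

-- ===== CLAIM (what is proved, stated in full; the proofs are below) =====
def Claim_equal_factor_num : Prop := ∀ (num : Int), Dom_factor_num num → Spec_factor_num num (factor_num num)

-- ===== LEMMAS AND PROOFS =====

-- closed form of A's loop on nonnegative arguments, by induction on the bound
theorem factor_num_closed (k : Nat) :
    factor_num (k : Int) = (k : Int) - (k : Int) / 3 - (k : Int) / 5 + 2 * ((k : Int) / 15) := by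
  induction k with
  | zero => decide
  | succ k ih =>
    unfold factor_num at ih ⊢
    push_cast
    rw [PySem.List.pyRange_one_succ_right (by omega), List.foldl_append]
    rw [ih]
    simp only [List.foldl]
    rw [PySem.Int.mod_eq_emod_of_pos (a := (k : Int) + 1) (b := 3) (by norm_num),
        PySem.Int.mod_eq_emod_of_pos (a := (k : Int) + 1) (b := 5) (by norm_num),
        PySem.Int.mod_eq_emod_of_pos (a := (k : Int) + 1) (b := 15) (by norm_num)]
    have h1 : 0 ≤ ((k : Int) + 1) % 15 := Int.emod_nonneg _ (by norm_num)
    have h2 : ((k : Int) + 1) % 15 < 15 := Int.emod_lt_of_pos _ (by norm_num)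
    set r := ((k : Int) + 1) % 15 with hr
    split_ifs with h <;> (interval_cases r <;> omega)

-- ===== VERDICT (by name: the statement is the Claim_ definition above) =====
theorem factor_num_spec : Claim_equal_factor_num := by
  intro num _
  unfold Spec_factor_num
  simp only [factor_num_alt]
  by_cases h : 0 ≤ num
  · obtain ⟨k, rfl⟩ := Int.eq_ofNat_of_zero_le h
    rw [max_eq_left (by positivity),
        PySem.Int.floordiv_eq_ediv_of_pos (by norm_num),
        PySem.Int.floordiv_eq_ediv_of_pos (by norm_num),
        PySem.Int.floordiv_eq_ediv_of_pos (by norm_num)]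
    exact factor_num_closed k
  · rw [max_eq_right (by omega)]
    unfold factor_num
    rw [PySem.List.pyRange_one_eq_nil (by omega)]
    decide
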